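-- pv_equiv track=rewrite | github.com/Fengyzh/RL-ShipBot | sarah.py | nameNumber
-- ===== SOURCE A (Python) =====
-- def sumDigits(number): # number is passed from function 2
--     # initialize sumAdd as 0
--     sumAdd = 0
--     # for loop to add every element in number list together
--     for num in number:
--         sumAdd += num
--     # if statement for sumAdd conditions
--     if sumAdd > 0 and sumAdd < 10:
--         return sumAdd # return sumAdd if true
--     else: # Divide by 10 if sumAdd is greater than 9
--         while sumAdd >= 10: # while loop to repeat floor division for big numbers
--             HunDigit = sumAdd // 10     # Get the hundredth digit
--             TenthDigit = sumAdd % 10    # Get the tenth digit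
--             sumAdd = HunDigit + TenthDigit  # Add them together
--         return sumAdd
--
-- def nameNumber(name):
--     # initialize numList as an empty list
--     number = []
--     # for loop to iterate through each character of name
--     # use .upper so that lowercase inputs are converted to uppercase
--     for i in name.upper():
--         # use .isalnum() to ignore special characters
--         if i.isalnum():
--             # if statements to see if the letters in the input meets condition and append value to number
--             if i == "A" or i == "I" or i == "J" or i == "Q" or i == "Y":
--                 number.append(1)
--             elif i == "B" or i == "K" or i == "R":
--                 number.append(2)
--             elif i == "C" or i == "G" or i == "L" or i == "S":
--                 number.append(3)
--             elif i == "D" or i == "M" or i == "T":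
--                 number.append(4)
--             elif i == "E" or i == "H" or i == "N" or i == "X":
--                 number.append(5)
--             elif i == "U" or i == "V" or i == "W":
--                 number.append(6)
--             elif i == "O" or i == "Z":
--                 number.append(7)
--             elif i == "F" or i == "P":
--                 number.append(8)
--     return sumDigits(number)
-- ===== SOURCE B (Python) =====
-- _MAP = {
--     'A': 1, 'I': 1, 'J': 1, 'Q': 1, 'Y': 1,
--     'B': 2, 'K': 2, 'R': 2,
--     'C': 3, 'G': 3, 'L': 3, 'S': 3,
--     'D': 4, 'M': 4, 'T': 4,
--     'E': 5, 'H': 5, 'N': 5, 'X': 5,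
--     'U': 6, 'V': 6, 'W': 6,
--     'O': 7, 'Z': 7,
--     'F': 8, 'P': 8,
-- }
--
-- def nameNumber(name):
--     s = 0
--     for c in name.upper():
--         s += _MAP.get(c, 0)
--     return 0 if s == 0 else 1 + (s - 1) % 9
-- ===== Notes on version B (the rewrite author's own statement) =====
-- stated objective: simpler
-- what changed: B accumulates the letter values directly via a dict lookup (no intermediate list, no if/elif chain) and replaces the iterative digital-root while-loop with the closed form 1 + (s - 1) % 9 (0 when s == 0).
import Mathlib
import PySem

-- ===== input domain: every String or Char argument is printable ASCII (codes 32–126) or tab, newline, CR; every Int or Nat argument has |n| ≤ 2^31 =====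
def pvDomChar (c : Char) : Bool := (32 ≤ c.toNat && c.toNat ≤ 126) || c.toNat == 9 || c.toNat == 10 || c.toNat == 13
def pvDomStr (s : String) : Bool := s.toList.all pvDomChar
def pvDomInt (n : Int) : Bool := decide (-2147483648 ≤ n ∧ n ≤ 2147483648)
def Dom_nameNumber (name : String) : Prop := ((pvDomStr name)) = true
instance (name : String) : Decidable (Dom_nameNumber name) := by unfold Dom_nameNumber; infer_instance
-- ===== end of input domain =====

-- B accumulates the letter values directly via one dict lookup per character (no intermediate list,
-- no if/elif chain) and replaces A's while-loop digital-root reduction by the closed form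
-- 1 + (s - 1) % 9 (0 when s = 0). Objective: simpler.

-- ===== PORT A =====
-- the 'while sumAdd >= 10' loop inside sumDigits
def sumDigitsWhile (s : Int) : Int :=
  if 10 ≤ s then
    sumDigitsWhile (PySem.Int.floordiv s 10 + PySem.Int.mod s 10)
  else s
termination_by s.toNat
decreasing_by
  rw [PySem.Int.floordiv_eq_ediv_of_pos (by omega), PySem.Int.mod_eq_emod_of_pos (by omega)]
  omega

def sumDigits (number : List Int) : Int :=
  let sumAdd := number.foldl (fun acc num => acc + num) 0
  if 0 < sumAdd ∧ sumAdd < 10 then sumAdd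
  else sumDigitsWhile sumAdd

-- the body of A's for-loop (one append per character)
def pvStepA (acc : List Int) (i : Char) : List Int :=
  if PySem.Chars.isalnum i then
    if i = 'A' ∨ i = 'I' ∨ i = 'J' ∨ i = 'Q' ∨ i = 'Y' then acc ++ [1]
    else if i = 'B' ∨ i = 'K' ∨ i = 'R' then acc ++ [2]
    else if i = 'C' ∨ i = 'G' ∨ i = 'L' ∨ i = 'S' then acc ++ [3]
    else if i = 'D' ∨ i = 'M' ∨ i = 'T' then acc ++ [4]
    else if i = 'E' ∨ i = 'H' ∨ i = 'N' ∨ i = 'X' then acc ++ [5]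
    else if i = 'U' ∨ i = 'V' ∨ i = 'W' then acc ++ [6]
    else if i = 'O' ∨ i = 'Z' then acc ++ [7]
    else if i = 'F' ∨ i = 'P' then acc ++ [8]
    else acc
  else acc

def nameNumber (name : String) : Int :=
  let number := (PySem.Str.upper name).toList.foldl pvStepA ([] : List Int)
  sumDigits number

-- ===== PORT B =====
def pvMap : PySem.Dict Char Int := PySem.Dict.ofList
  [('A',1),('I',1),('J',1),('Q',1),('Y',1),
   ('B',2),('K',2),('R',2),
   ('C',3),('G',3),('L',3),('S',3),
   ('D',4),('M',4),('T',4),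
   ('E',5),('H',5),('N',5),('X',5),
   ('U',6),('V',6),('W',6),
   ('O',7),('Z',7),
   ('F',8),('P',8)]

def nameNumber_alt (name : String) : Int :=
  let s := (PySem.Str.upper name).toList.foldl (fun s c => s + pvMap.getD c 0) 0
  if s = 0 then 0 else 1 + PySem.Int.mod (s - 1) 9

-- ===== PRECONDITION & SPEC =====
def Spec_nameNumber (name : String) (out : Int) : Prop := out = nameNumber_alt name
instance (name : String) (out : Int) : Decidable (Spec_nameNumber name out) := by unfold Spec_nameNumber; infer_instance

-- ===== CLAIM (what is proved, stated in full; the proofs are below) =====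
def Claim_equal_nameNumber : Prop := ∀ (name : String), Dom_nameNumber name → Spec_nameNumber name (nameNumber name)

-- ===== LEMMAS AND PROOFS =====

def pvKeys : List Char :=
  ['A','I','J','Q','Y','B','K','R','C','G','L','S','D','M','T',
   'E','H','N','X','U','V','W','O','Z','F','P']

theorem pvMap_mk : pvMap = PySem.Dict.mk
  [('A',1),('I',1),('J',1),('Q',1),('Y',1),('B',2),('K',2),('R',2),
   ('C',3),('G',3),('L',3),('S',3),('D',4),('M',4),('T',4),
   ('E',5),('H',5),('N',5),('X',5),('U',6),('V',6),('W',6),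
   ('O',7),('Z',7),('F',8),('P',8)] := by decide

theorem getD_notkey (c : Char) (h : c ∉ pvKeys) : pvMap.getD c 0 = 0 := by
  simp [pvKeys, List.mem_cons, not_or] at h
  obtain ⟨a1,a2,a3,a4,a5,b1,b2,b3,c1,c2,c3,c4,d1,d2,d3,e1,e2,e3,e4,f1,f2,f3,g1,g2,k1,k2⟩ := h
  simp [pvMap_mk, PySem.Dict.getD, PySem.Dict.get?,
    Ne.symm a1, Ne.symm a2, Ne.symm a3, Ne.symm a4, Ne.symm a5,
    Ne.symm b1, Ne.symm b2, Ne.symm b3, Ne.symm c1, Ne.symm c2, Ne.symm c3, Ne.symm c4,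
    Ne.symm d1, Ne.symm d2, Ne.symm d3, Ne.symm e1, Ne.symm e2, Ne.symm e3, Ne.symm e4,
    Ne.symm f1, Ne.symm f2, Ne.symm f3, Ne.symm g1, Ne.symm g2, Ne.symm k1, Ne.symm k2]

-- per-character: the sum contributed by A's step equals B's dict lookup
theorem stepA_sum (acc : List Int) (c : Char) :
    (pvStepA acc c).foldl (fun a n => a + n) 0
      = acc.foldl (fun a n => a + n) 0 + pvMap.getD c 0 := by
  unfold pvStepA
  split_ifs with h0 h1 h2 h3 h4 h5 h6 h7 h8
  · rcases h1 with rfl | rfl | rfl | rfl | rfl <;> simp [List.foldl_append] <;> decide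
  · rcases h2 with rfl | rfl | rfl <;> simp [List.foldl_append] <;> decide
  · rcases h3 with rfl | rfl | rfl | rfl <;> simp [List.foldl_append] <;> decide
  · rcases h4 with rfl | rfl | rfl <;> simp [List.foldl_append] <;> decide
  · rcases h5 with rfl | rfl | rfl | rfl <;> simp [List.foldl_append] <;> decide
  · rcases h6 with rfl | rfl | rfl <;> simp [List.foldl_append] <;> decide
  · rcases h7 with rfl | rfl <;> simp [List.foldl_append] <;> decide
  · rcases h8 with rfl | rfl <;> simp [List.foldl_append] <;> decide
  · rw [getD_notkey c (by simp [pvKeys, List.mem_cons]; tauto)]; ring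
  · -- not alphanumeric, hence not one of the 26 letter keys
    rw [getD_notkey c ?_]
    · ring
    · intro hc
      have hall : ∀ x ∈ pvKeys, PySem.Chars.isalnum x = true := by
        intro x hx; fin_cases hx <;> decide
      exact h0 (hall c hc)

-- B's accumulator shifts out of the fold
theorem foldB_shift (cs : List Char) (s : Int) :
    cs.foldl (fun s c => s + pvMap.getD c 0) s
      = s + cs.foldl (fun s c => s + pvMap.getD c 0) 0 := by
  induction cs generalizing s with
  | nil => simp
  | cons c cs ih => simp only [List.foldl_cons]; rw [ih, ih (0 + _)]; ring

-- sum of A's accumulated list = B's accumulated total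
theorem sumA_eq_sumB (cs : List Char) (acc : List Int) :
    (cs.foldl pvStepA acc).foldl (fun a n => a + n) 0
      = acc.foldl (fun a n => a + n) 0 + cs.foldl (fun s c => s + pvMap.getD c 0) 0 := by
  induction cs generalizing acc with
  | nil => simp
  | cons c cs ih =>
      simp only [List.foldl_cons]
      rw [ih, stepA_sum, foldB_shift cs (0 + pvMap.getD c 0)]
      ring

theorem getD_nonneg (c : Char) : 0 ≤ pvMap.getD c 0 := by
  by_cases h : c ∈ pvKeys
  · fin_cases h <;> decide
  · rw [getD_notkey c h]

theorem sumB_nonneg (cs : List Char) :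
    0 ≤ cs.foldl (fun s c => s + pvMap.getD c 0) 0 := by
  induction cs with
  | nil => simp
  | cons c cs ih =>
      simp only [List.foldl_cons]
      rw [foldB_shift cs (0 + pvMap.getD c 0)]
      have := getD_nonneg c
      omega

-- the while loop computes the closed-form digital root on nonnegative input
theorem sumDigitsWhile_closed (s : Int) (hs : 0 ≤ s) :
    sumDigitsWhile s = if s = 0 then 0 else 1 + PySem.Int.mod (s - 1) 9 := by
  rw [sumDigitsWhile]
  by_cases h10 : 10 ≤ s
  · rw [if_pos h10]
    rw [PySem.Int.floordiv_eq_ediv_of_pos (by omega), PySem.Int.mod_eq_emod_of_pos (by omega)]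
    rw [sumDigitsWhile_closed (s / 10 + s % 10) (by omega)]
    rw [PySem.Int.mod_eq_emod_of_pos (b := 9) (by omega),
        PySem.Int.mod_eq_emod_of_pos (b := 9) (by omega)]
    split_ifs <;> omega
  · rw [if_neg h10]
    rw [PySem.Int.mod_eq_emod_of_pos (b := 9) (by omega)]
    split_ifs <;> omega
termination_by s.toNat
decreasing_by
  omega

-- ===== VERDICT (by name: the statement is the Claim_ definition above) =====
theorem nameNumber_spec : Claim_equal_nameNumber := by
  intro name _
  unfold Spec_nameNumber nameNumber nameNumber_alt sumDigits
  set cs := (PySem.Str.upper name).toList with hcs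
  have hsum := sumA_eq_sumB cs []
  simp only [List.foldl_nil, zero_add] at hsum
  set S := cs.foldl (fun s c => s + pvMap.getD c 0) 0 with hS
  have hSnn : 0 ≤ S := sumB_nonneg cs
  simp only [hsum]
  have hclosed := sumDigitsWhile_closed S hSnn
  by_cases hrange : 0 < S ∧ S < 10
  · rw [if_pos hrange]
    rw [PySem.Int.mod_eq_emod_of_pos (b := 9) (by omega)]
    split_ifs <;> omega
  · rw [if_neg hrange, hclosed]
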